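-- pv_equiv track=rewrite | github.com/Lazar-Ilic/Lazar | Notes/Puzzles/Implementations/IBM Ponder This/IBM Ponder This 2026-04.py | compute_undeducible
-- ===== SOURCE A (Python) =====
-- import math
--
-- def compute_undeducible(H, M, S):
--     K = H - 1
--     L = H * M - 1
--
--     if K == 0 or L == 0:
--         return 0
--
--     if math.gcd(K, L) == 1:
--         return 3 * L**2 - L * K - K**2 - 2 * L - 1
--
--     g = math.gcd(K, L)
--
--     M2 = abs(L**2 - K**2) // g
--     M3 = abs(K**2 - 2*K*L) // g
--     M4 = abs(L**2 - L*K + K**2) // g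
--     M6 = abs(2*K*L - L**2) // g
--
--     G2 = abs(L - K)
--     G3 = abs(K)
--     G4 = math.gcd(K + L, 3 * K)
--     G6 = abs(L)
--
--     params = [M2, M3, M4, M6, G2, G3, G4, G6]
--
--     def is_valid(mask):
--         for i in range(4):
--             if (mask & (1 << i)) and not (mask & (1 << (i + 4))):
--                 return True
--         return False
--
--     total = 0
--     for y in range(1, 256):
--         y_params = [params[i] for i in range(8) if (y & (1 << i))]
--         if not y_params: continue
--
--         y_gcd = y_params[0]
--         for val in y_params[1:]:
--             y_gcd = math.gcd(y_gcd, val) if val != 0 else 0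
--         if y_gcd == 0: continue
--
--         Wy = 0
--         for x in range(256):
--             if (x & y) == x and is_valid(x):
--                 sign = 1 if ((y - x).bit_count() % 2 == 0) else -1
--                 Wy += sign
--
--         total += Wy * y_gcd
--
--     return total
-- ===== SOURCE B (Python) =====
-- import math
--
-- def compute_undeducible(H, M, S):
--     K = H - 1
--     L = H * M - 1
--     if K == 0 or L == 0:
--         return 0
--     g = math.gcd(K, L)
--     if g == 1:
--         return 3 * L * L - L * K - K * K - 2 * L - 1
--     params = [abs(L * L - K * K) // g, abs(K * K - 2 * K * L) // g,
--               abs(L * L - L * K + K * K) // g, abs(2 * K * L - L * L) // g,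
--               abs(L - K), abs(K), math.gcd(K + L, 3 * K), abs(L)]
--     # Only masks y whose high nibble is a submask of the low nibble have a
--     # nonzero inclusion-exclusion weight, and there the weight is +-1; so we
--     # enumerate (low nibble a, submask b of a) directly instead of scanning
--     # all 256*256 (y, x) pairs.
--     total = 0
--     for a in range(1, 16):
--         b = a
--         while True:  # b runs over the submasks of a, descending
--             y = a | (b << 4)
--             gy = 0
--             for i in range(8):  # gcd with reset-on-zero over the bits of y
--                 if y & (1 << i):
--                     gy = 0 if params[i] == 0 else math.gcd(gy, params[i])
--             sign = -1 if bin(a ^ b).count('1') % 2 == 0 else 1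
--             total += sign * gy
--             if b == 0:
--                 break
--             b = (b - 1) & a
--     return total
-- ===== Notes on version B (the rewrite author's own statement) =====
-- stated objective: alternative
-- what changed: A scans all 255 masks y and, for each, all 256 submasks x to build the inclusion-exclusion weight Wy; B instead enumerates only the (low-nibble, high-nibble-submask) pairs whose weight is nonzero, reads the weight off the pair's popcount parity, and computes each y's gcd by a single reset-on-zero pass over the 8 bit positions instead of building the filtered parameter list and folding it.
import Mathlib
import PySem

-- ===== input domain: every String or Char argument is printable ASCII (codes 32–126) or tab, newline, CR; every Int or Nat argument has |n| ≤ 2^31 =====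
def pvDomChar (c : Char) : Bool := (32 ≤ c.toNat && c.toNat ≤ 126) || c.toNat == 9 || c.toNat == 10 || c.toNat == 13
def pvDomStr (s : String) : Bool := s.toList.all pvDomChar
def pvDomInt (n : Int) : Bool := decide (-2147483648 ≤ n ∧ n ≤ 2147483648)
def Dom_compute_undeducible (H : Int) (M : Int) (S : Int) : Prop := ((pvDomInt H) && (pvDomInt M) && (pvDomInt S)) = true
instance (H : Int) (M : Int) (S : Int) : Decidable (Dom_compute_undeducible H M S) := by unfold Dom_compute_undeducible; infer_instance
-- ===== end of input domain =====

-- B replaces A's scan over all 255 masks y with an inner 256-term inclusion-exclusion sum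
-- by a direct enumeration of the (low nibble, high-nibble submask) pairs whose weight is ±1,
-- with the gcd computed by a reset-on-zero scan over the bits; objective: alternative/faster inner structure.

-- ===== PORT A =====
-- n.bit_count() for nonnegative n (masks here are Nats < 256)
def pvPopcountAux : Nat → Nat → Nat
  | 0, _ => 0
  | fuel + 1, n => if n = 0 then 0 else n % 2 + pvPopcountAux fuel (n / 2)

def pvPopcount (n : Nat) : Nat := pvPopcountAux n n

-- A's is_valid(mask): early-return-True loop over i in range(4)
def pvIsValid (mask : Nat) : Bool :=
  (List.range 4).any (fun i => (mask &&& (1 <<< i) != 0) && (mask &&& (1 <<< (i + 4)) == 0))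

-- A's inner loop: Wy = sum over x in range(256) of the signed validity indicator
def pvWyA (y : Nat) : Int :=
  (List.range 256).foldl
    (fun w x =>
      if (x &&& y == x) && pvIsValid x then
        w + (if pvPopcount (y - x) % 2 == 0 then (1 : Int) else -1)
      else w)
    0

-- body of A's 'for y in range(1, 256)' loop
def pvStepA (params : List Int) (total : Int) (y : Nat) : Int :=
  let y_params := ((List.range 8).filter (fun i => y &&& (1 <<< i) != 0)).map (fun i => params.getD i 0)
  match y_params with
  | [] => total
  | h :: t =>
    let y_gcd := t.foldl (fun acc val => if val ≠ 0 then (Int.gcd acc val : Int) else 0) h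
    if y_gcd = 0 then total
    else total + pvWyA y * y_gcd

def compute_undeducible (H : Int) (M : Int) (S : Int) : Int :=
  let K := H - 1
  let L := H * M - 1
  if K = 0 ∨ L = 0 then 0
  else if (Int.gcd K L : Int) = 1 then 3 * L ^ 2 - L * K - K ^ 2 - 2 * L - 1
  else
    let g : Int := Int.gcd K L
    let M2 := PySem.Int.floordiv |L ^ 2 - K ^ 2| g
    let M3 := PySem.Int.floordiv |K ^ 2 - 2 * K * L| g
    let M4 := PySem.Int.floordiv |L ^ 2 - L * K + K ^ 2| g
    let M6 := PySem.Int.floordiv |2 * K * L - L ^ 2| g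
    let G2 := |L - K|
    let G3 := |K|
    let G4 : Int := Int.gcd (K + L) (3 * K)
    let G6 := |L|
    let params := [M2, M3, M4, M6, G2, G3, G4, G6]
    (List.range' 1 255).foldl (pvStepA params) 0

-- ===== PORT B =====
-- B's gcd with reset-on-zero, one pass over the 8 bit positions of y
def pvGcdB (params : List Int) (y : Nat) : Int :=
  (List.range 8).foldl
    (fun gy i =>
      if y &&& (1 <<< i) != 0 then
        if params.getD i 0 = 0 then 0 else (Int.gcd gy (params.getD i 0) : Int)
      else gy)
    0

-- B's sign: -1 if popcount(a ^ b) is even else 1  (bin(a ^ b).count('1'))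
def pvSignB (a : Nat) (b : Nat) : Int :=
  if pvPopcount (a ^^^ b) % 2 == 0 then -1 else 1

-- B's 'while True' over the submasks b of a, descending; fuel 16 bounds the ≤ 16 iterations
def pvInnerB (params : List Int) (a : Nat) : Nat → Nat → Int → Int
  | 0, _, acc => acc
  | fuel + 1, b, acc =>
    let y := a ||| (b <<< 4)
    let acc' := acc + pvSignB a b * pvGcdB params y
    if b = 0 then acc' else pvInnerB params a fuel ((b - 1) &&& a) acc'

def compute_undeducible_alt (H : Int) (M : Int) (S : Int) : Int :=
  let K := H - 1
  let L := H * M - 1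
  if K = 0 ∨ L = 0 then 0
  else
    let g : Int := Int.gcd K L
    if g = 1 then 3 * L * L - L * K - K * K - 2 * L - 1
    else
      let params := [PySem.Int.floordiv |L * L - K * K| g, PySem.Int.floordiv |K * K - 2 * K * L| g,
                     PySem.Int.floordiv |L * L - L * K + K * K| g, PySem.Int.floordiv |2 * K * L - L * L| g,
                     |L - K|, |K|, (Int.gcd (K + L) (3 * K) : Int), |L|]
      (List.range' 1 15).foldl (fun tot a => pvInnerB params a 16 a tot) 0

-- ===== PRECONDITION & SPEC =====
def Spec_compute_undeducible (H : Int) (M : Int) (S : Int) (out : Int) : Prop := out = compute_undeducible_alt H M S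
instance (H : Int) (M : Int) (S : Int) (out : Int) : Decidable (Spec_compute_undeducible H M S out) := by unfold Spec_compute_undeducible; infer_instance

-- ===== CLAIM (what is proved, stated in full; the proofs are below) =====
def Claim_equal_compute_undeducible : Prop := ∀ (H : Int) (M : Int) (S : Int), Dom_compute_undeducible H M S → Spec_compute_undeducible H M S (compute_undeducible H M S)

-- ===== LEMMAS AND PROOFS =====

-- the list of submasks b that pvInnerB visits (mirror of its recursion, for the proofs)
def pvSubs (a : Nat) : Nat → Nat → List Nat
  | 0, _ => []
  | fuel + 1, b => b :: (if b = 0 then [] else pvSubs a fuel ((b - 1) &&& a))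

-- B's sign as a function of y alone (on B's enumeration, y &&& 15 = a and y >>> 4 = b)
def pvW (y : Nat) : Int := pvSignB (y &&& 15) (y >>> 4)

-- the list of y values B visits
def pvLB : List Nat :=
  (List.range' 1 15).flatMap (fun a => (pvSubs a 16 a).map (fun b => a ||| b <<< 4))

-- generic: a foldl that adds f of each element is init + sum of the mapped list
theorem pv_foldl_add {α : Type} (f : α → Int) :
    ∀ (l : List α) (init : Int), l.foldl (fun t y => t + f y) init = init + (l.map f).sum := by
  intro l
  induction l with
  | nil => simp
  | cons a t ih => intro init; simp [ih, add_assoc]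

-- generic: a guarded fold over indices equals a fold over the filtered, mapped list
theorem pv_fold_if_filter {α β : Type} (p : α → Bool) (m : α → β) (step : Int → β → Int) :
    ∀ (l : List α) (g0 : Int),
      l.foldl (fun g i => if p i then step g (m i) else g) g0
        = ((l.filter p).map m).foldl step g0 := by
  intro l
  induction l with
  | nil => simp
  | cons a t ih =>
    intro g0
    by_cases h : p a <;> simp [h, ih]

-- generic: sum over a flatMap is the sum of the inner sums
theorem pv_sum_flatMap {α β : Type} (g : α → List β) (f : β → Int) (l : List α) :
    ((l.flatMap g).map f).sum = (l.map (fun a => ((g a).map f).sum)).sum := by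
  induction l with
  | nil => simp
  | cons a t ih => simp [List.flatMap_cons, ih]

-- generic: terms that vanish outside p can be dropped from the sum
theorem pv_sum_filter_zero (l : List Nat) (p : Nat → Bool) (f : Nat → Int)
    (h0 : ∀ y ∈ l, p y = false → f y = 0) :
    (l.map f).sum = ((l.filter p).map f).sum := by
  induction l with
  | nil => simp
  | cons a t ih =>
    have ht : ∀ y ∈ t, p y = false → f y = 0 := fun y hy => h0 y (List.mem_cons_of_mem _ hy)
    by_cases h : p a = true
    · simp [h, ih ht]
    · have := h0 a (List.mem_cons_self) (by simpa using h)
      simp [Bool.not_eq_true] at h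
      simp [h, this, ih ht]

theorem pv_getD_nonneg (params : List Int) (h : ∀ v ∈ params, 0 ≤ v) (i : Nat) :
    0 ≤ params.getD i 0 := by
  rcases lt_or_ge i params.length with hi | hi
  · rw [List.getD_eq_getElem _ _ hi]
    exact h _ (List.getElem_mem hi)
  · rw [List.getD_eq_default _ _ hi]

-- A's per-y step adds exactly Wy * (B's reset-on-zero gcd)
theorem pv_stepA_eq (params : List Int) (h : ∀ v ∈ params, 0 ≤ v) (t : Int) (y : Nat) :
    pvStepA params t y = t + pvWyA y * pvGcdB params y := by
  have hG : pvGcdB params y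
      = (((List.range 8).filter (fun i => y &&& (1 <<< i) != 0)).map (fun i => params.getD i 0)).foldl
          (fun gy v => if v = 0 then 0 else (Int.gcd gy v : Int)) 0 := by
    unfold pvGcdB
    exact pv_fold_if_filter (fun i => y &&& (1 <<< i) != 0) (fun i => params.getD i 0)
      (fun gy v => if v = 0 then 0 else (Int.gcd gy v : Int)) (List.range 8) 0
  unfold pvStepA
  rcases hl : ((List.range 8).filter (fun i => y &&& (1 <<< i) != 0)).map (fun i => params.getD i 0) with _ | ⟨h0, tl⟩
  · rw [hG, hl]
    simp
  · -- head of y_params is one of the params, hence nonnegative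
    have h0nn : 0 ≤ h0 := by
      have : h0 ∈ ((List.range 8).filter (fun i => y &&& (1 <<< i) != 0)).map (fun i => params.getD i 0) := by
        rw [hl]; exact List.mem_cons_self
      rcases List.mem_map.mp this with ⟨i, _, hi⟩
      rw [← hi]; exact pv_getD_nonneg params h i
    have hstep : ∀ (l : List Int) (acc : Int),
        l.foldl (fun acc val => if val ≠ 0 then (Int.gcd acc val : Int) else 0) acc
          = l.foldl (fun gy v => if v = 0 then 0 else (Int.gcd gy v : Int)) acc := by
      intro l
      induction l with
      | nil => intro acc; rfl
      | cons v l ih =>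
        intro acc
        by_cases hv : v = 0 <;> simp only [hv, if_true, if_false, ne_eq,
          not_true_eq_false, not_false_eq_true, List.foldl_cons] <;> exact ih _
    have hinit : (if h0 = 0 then (0 : Int) else (Int.gcd 0 h0 : Int)) = h0 := by
      by_cases h0z : h0 = 0
      · simp [h0z]
      · simp [h0z, Int.gcd]
        omega
    have hGval : pvGcdB params y
        = tl.foldl (fun acc val => if val ≠ 0 then (Int.gcd acc val : Int) else 0) h0 := by
      rw [hG, hl, List.foldl_cons, hstep, hinit]
    show (if (tl.foldl (fun acc val => if val ≠ 0 then (Int.gcd acc val : Int) else 0) h0) = 0 then t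
          else t + pvWyA y * (tl.foldl (fun acc val => if val ≠ 0 then (Int.gcd acc val : Int) else 0) h0))
        = t + pvWyA y * pvGcdB params y
    rw [← hGval]
    by_cases hz : pvGcdB params y = 0
    · simp [hz]
    · simp [hz]

-- unrolling B's inner while-loop into a sum over the visited submasks
theorem pv_innerB_eq (params : List Int) (a : Nat) :
    ∀ (fuel b : Nat) (acc : Int),
      pvInnerB params a fuel b acc
        = acc + ((pvSubs a fuel b).map (fun b => pvSignB a b * pvGcdB params (a ||| b <<< 4))).sum := by
  intro fuel
  induction fuel with
  | zero => intro b acc; simp [pvInnerB, pvSubs]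
  | succ n ih =>
    intro b acc
    by_cases hb : b = 0
    · simp [pvInnerB, pvSubs, hb]
    · simp [pvInnerB, pvSubs, hb, ih, add_assoc]

-- on B's enumeration, the per-pair sign agrees with the y-only closed form
set_option maxRecDepth 2000 in
theorem pv_sign_pairs :
    ∀ a ∈ List.range' 1 15, ∀ b ∈ pvSubs a 16 a, pvSignB a b = pvW (a ||| b <<< 4) := by decide

-- A's 256-term alternating sum, evaluated on every y: zero off pvLB, the closed-form sign on it
set_option maxRecDepth 8000 in
set_option maxHeartbeats 4000000 in
theorem pv_wyA_closed :
    ∀ y ∈ List.range' 1 255, pvWyA y = if y ∈ pvLB then pvW y else 0 := by decide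

-- the y values of A's loop that carry nonzero weight are a permutation of B's enumeration
set_option maxRecDepth 8000 in
theorem pv_perm :
    List.Perm ((List.range' 1 255).filter (fun y => decide (y ∈ pvLB))) pvLB := by decide

-- the main accounting identity, for any nonnegative parameter list
theorem pv_total_eq (params : List Int) (hnn : ∀ v ∈ params, 0 ≤ v) :
    (List.range' 1 255).foldl (pvStepA params) 0
      = (List.range' 1 15).foldl (fun tot a => pvInnerB params a 16 a tot) 0 := by
  have hA : (List.range' 1 255).foldl (pvStepA params) 0
      = ((List.range' 1 255).map (fun y => pvWyA y * pvGcdB params y)).sum := by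
    rw [List.foldl_ext (pvStepA params) (fun t y => t + pvWyA y * pvGcdB params y) 0
      (fun t y _ => pv_stepA_eq params hnn t y)]
    rw [pv_foldl_add]; ring
  have hB : (List.range' 1 15).foldl (fun tot a => pvInnerB params a 16 a tot) 0
      = (pvLB.map (fun y => pvW y * pvGcdB params y)).sum := by
    rw [List.foldl_ext (fun tot a => pvInnerB params a 16 a tot)
      (fun tot a => tot + ((pvSubs a 16 a).map (fun b => pvSignB a b * pvGcdB params (a ||| b <<< 4))).sum) 0
      (fun tot a _ => pv_innerB_eq params a 16 a tot)]
    rw [pv_foldl_add, zero_add]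
    unfold pvLB
    rw [pv_sum_flatMap]
    refine congrArg List.sum (List.map_congr_left fun a ha => ?_)
    rw [List.map_map]
    refine congrArg List.sum (List.map_congr_left fun b hb => ?_)
    simp only [Function.comp]
    rw [pv_sign_pairs a ha b hb]
  rw [hA, hB]
  rw [List.map_congr_left (g := fun y => (if y ∈ pvLB then pvW y else 0) * pvGcdB params y)
    (fun y hy => by rw [pv_wyA_closed y hy])]
  rw [pv_sum_filter_zero _ (fun y => decide (y ∈ pvLB)) _
    (fun y _ hy => by simp at hy; simp [hy])]
  rw [List.map_congr_left (l := (List.range' 1 255).filter (fun y => decide (y ∈ pvLB)))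
    (g := fun y => pvW y * pvGcdB params y)
    (fun y hy => by
      have := (List.mem_filter.mp hy).2
      simp at this
      simp [this])]
  exact ((pv_perm).map (fun y => pvW y * pvGcdB params y)).sum_eq

-- ===== VERDICT (by name: the statement is the Claim_ definition above) =====
theorem compute_undeducible_spec : Claim_equal_compute_undeducible := by
  intro H M S _
  unfold Spec_compute_undeducible compute_undeducible compute_undeducible_alt
  dsimp only
  split_ifs with h1 h2
  · rfl
  · ring
  · have hK : H - 1 ≠ 0 := fun h => h1 (Or.inl h)
    have hg : 0 < ((Int.gcd (H - 1) (H * M - 1) : Nat) : Int) := by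
      have : Int.gcd (H - 1) (H * M - 1) ≠ 0 := by
        simp [Int.gcd_eq_zero_iff]; tauto
      exact_mod_cast Nat.pos_of_ne_zero this
    have hfd : ∀ x : Int, 0 ≤ x → 0 ≤ PySem.Int.floordiv x ((Int.gcd (H - 1) (H * M - 1) : Nat) : Int) := by
      intro x hx
      rw [PySem.Int.floordiv_eq_ediv_of_pos hg]
      exact Int.ediv_nonneg hx hg.le
    simp only [pow_two]
    apply pv_total_eq
    intro v hv
    simp only [List.mem_cons, List.not_mem_nil, or_false] at hv
    rcases hv with h | h | h | h | h | h | h | h <;> subst h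
    · exact hfd _ (abs_nonneg _)
    · exact hfd _ (abs_nonneg _)
    · exact hfd _ (abs_nonneg _)
    · exact hfd _ (abs_nonneg _)
    · exact abs_nonneg _
    · exact abs_nonneg _
    · exact Int.natCast_nonneg _
    · exact abs_nonneg _
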